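-- pv_equiv track=rewrite | github.com/MisterSharp/Web-Caesar | caesar.py | alphabet_position
-- ===== SOURCE A (Python) =====
-- def alphabet_position(a):
--     letters = {}
--     for i in range(26):
--         x = i + 97
--         letters[chr(x)] = i
--     if a.isupper():
--         return letters.get(a.lower())
--     else:
--         return letters.get(a)
-- ===== SOURCE B (Python) =====
-- def alphabet_position(a):
--     s = a.lower()
--     if len(s) == 1 and 97 <= ord(s) <= 122:
--         return ord(s) - 97
--     return None
-- ===== Notes on version B (the rewrite author's own statement) =====
-- stated objective: simpler
-- what changed: Replaces the 26-entry dict built in a loop and the isupper branch by a single arithmetic check: lowercase the string and return ord minus 97 when it is a single lowercase letter, else None.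
import Mathlib
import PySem

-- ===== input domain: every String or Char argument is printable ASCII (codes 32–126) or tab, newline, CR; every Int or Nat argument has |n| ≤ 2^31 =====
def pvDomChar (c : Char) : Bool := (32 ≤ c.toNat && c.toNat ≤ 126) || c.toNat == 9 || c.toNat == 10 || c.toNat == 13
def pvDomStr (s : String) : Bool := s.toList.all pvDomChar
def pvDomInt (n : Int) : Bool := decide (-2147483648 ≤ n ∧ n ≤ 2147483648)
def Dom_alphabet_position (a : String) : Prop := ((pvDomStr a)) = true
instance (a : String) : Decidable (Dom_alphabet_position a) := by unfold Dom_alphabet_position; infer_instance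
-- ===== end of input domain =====

-- B drops A's 26-entry dict and isupper branch for a single arithmetic range check (simpler); same return value on all of Dom.


-- ===== PORT A =====
-- hand port of Python str.isupper() — exact on the ASCII domain, where the cased
-- characters are exactly A–Z and a–z: "at least one cased char and no lowercase one"
def pyStrIsUpper (s : String) : Bool :=
  s.toList.any PySem.Chars.isupper && !(s.toList.any PySem.Chars.islower)

-- the dict A builds: letters[chr(i+97)] = i for i in range(26)
-- (chr(x) ported by hand as the one-character string of code point x — exact for 97 ≤ x ≤ 122)
def lettersA : PySem.Dict String Int :=
  (PySem.List.pyRange 0 26 1).foldl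
    (fun d i => d.insert (String.ofList [Char.ofNat (i + 97).toNat]) i) PySem.Dict.empty

def alphabet_position (a : String) : Option Int :=
  if pyStrIsUpper a then lettersA.get? (PySem.Str.lower a)
  else lettersA.get? a

-- ===== PORT B =====
-- ord(s) on the length-1 string s is the code point of its sole character (headD's default is never used: the branch is guarded by length = 1)
def alphabet_position_alt (a : String) : Option Int :=
  let l := (PySem.Str.lower a).toList
  if l.length = 1 ∧ 97 ≤ (l.headD ' ').toNat ∧ (l.headD ' ').toNat ≤ 122 then
    some (((l.headD ' ').toNat : Int) - 97)
  else
    none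

-- ===== PRECONDITION & SPEC =====
def Spec_alphabet_position (a : String) (out : Option Int) : Prop := out = alphabet_position_alt a
instance (a : String) (out : Option Int) : Decidable (Spec_alphabet_position a out) := by unfold Spec_alphabet_position; infer_instance

-- ===== CLAIM (what is proved, stated in full; the proofs are below) =====
def Claim_equal_alphabet_position : Prop := ∀ (a : String), Dom_alphabet_position a → Spec_alphabet_position a (alphabet_position a)

-- ===== LEMMAS AND PROOFS =====

-- the dict as a literal
theorem lettersA_eq : lettersA = PySem.Dict.mk
    [("a", 0), ("b", 1), ("c", 2), ("d", 3), ("e", 4), ("f", 5), ("g", 6), ("h", 7),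
     ("i", 8), ("j", 9), ("k", 10), ("l", 11), ("m", 12), ("n", 13), ("o", 14), ("p", 15),
     ("q", 16), ("r", 17), ("s", 18), ("t", 19), ("u", 20), ("v", 21), ("w", 22), ("x", 23),
     ("y", 24), ("z", 25)] := by decide

-- lookup of a string that is not a single character misses every (length-1) key
theorem lettersA_get?_nonsingle (s : String) (h : s.toList.length ≠ 1) :
    lettersA.get? s = none := by
  have hne : ∀ t : String, t.toList.length = 1 → (t == s) = false := by
    intro t ht
    apply beq_eq_false_iff_ne.mpr
    intro he; exact h (he ▸ ht)
  rw [lettersA_eq]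
  simp [hne _ (by decide : ("a" : String).toList.length = 1),
    hne _ (by decide : ("b" : String).toList.length = 1),
    hne _ (by decide : ("c" : String).toList.length = 1),
    hne _ (by decide : ("d" : String).toList.length = 1),
    hne _ (by decide : ("e" : String).toList.length = 1),
    hne _ (by decide : ("f" : String).toList.length = 1),
    hne _ (by decide : ("g" : String).toList.length = 1),
    hne _ (by decide : ("h" : String).toList.length = 1),
    hne _ (by decide : ("i" : String).toList.length = 1),
    hne _ (by decide : ("j" : String).toList.length = 1),
    hne _ (by decide : ("k" : String).toList.length = 1),
    hne _ (by decide : ("l" : String).toList.length = 1),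
    hne _ (by decide : ("m" : String).toList.length = 1),
    hne _ (by decide : ("n" : String).toList.length = 1),
    hne _ (by decide : ("o" : String).toList.length = 1),
    hne _ (by decide : ("p" : String).toList.length = 1),
    hne _ (by decide : ("q" : String).toList.length = 1),
    hne _ (by decide : ("r" : String).toList.length = 1),
    hne _ (by decide : ("s" : String).toList.length = 1),
    hne _ (by decide : ("t" : String).toList.length = 1),
    hne _ (by decide : ("u" : String).toList.length = 1),
    hne _ (by decide : ("v" : String).toList.length = 1),
    hne _ (by decide : ("w" : String).toList.length = 1),
    hne _ (by decide : ("x" : String).toList.length = 1),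
    hne _ (by decide : ("y" : String).toList.length = 1),
    hne _ (by decide : ("z" : String).toList.length = 1), PySem.Dict.get?]

-- lower is length-preserving (it maps lowerChar over the characters)
theorem lower_length (s : String) :
    (PySem.Str.lower s).toList.length = s.toList.length := by
  simp [PySem.Chars.lower]

-- the whole equivalence for every single character of code point < 127, by evaluation
theorem single_char_equiv : ∀ n : Fin 127,
    alphabet_position (String.ofList [Char.ofNat n]) =
      alphabet_position_alt (String.ofList [Char.ofNat n]) := by
  set_option maxRecDepth 4096 in decide

-- ===== VERDICT (by name: the statement is the Claim_ definition above) =====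
theorem alphabet_position_spec : Claim_equal_alphabet_position := by
  intro a hdom
  unfold Spec_alphabet_position
  by_cases h1 : a.toList.length = 1
  · -- a is a single character in the domain: finish by single_char_equiv
    obtain ⟨c, hc⟩ : ∃ c, a.toList = [c] := by
      cases hl : a.toList with
      | nil => simp [hl] at h1
      | cons x xs =>
        cases xs with
        | nil => exact ⟨x, rfl⟩
        | cons y ys => simp [hl] at h1
    have hlt : c.toNat < 127 := by
      have := List.all_eq_true.mp hdom c (by simp [hc])
      simp [pvDomChar] at this
      omega
    have ha : a = String.ofList [Char.ofNat c.toNat] := by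
      rw [Char.ofNat_toNat]
      have := congrArg String.ofList hc
      simpa using this
    rw [ha]
    exact single_char_equiv ⟨c.toNat, hlt⟩
  · -- otherwise both sides return none
    have hb : alphabet_position_alt a = none := by
      unfold alphabet_position_alt
      rw [if_neg]
      intro ⟨hlen, _⟩
      exact h1 (by rw [← lower_length a]; exact hlen)
    have hlow : (PySem.Str.lower a).toList.length ≠ 1 := by
      rw [lower_length a]; exact h1
    unfold alphabet_position
    rw [hb, lettersA_get?_nonsingle _ hlow, lettersA_get?_nonsingle _ h1]
    simp
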